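-- pv_equiv track=rewrite | github.com/nith1989/Community-Detection-Sentiment-Analysis | classify.py | afinn_sentiment2
-- ===== SOURCE A (Python) =====
-- def afinn_sentiment2(terms, afinn, verbose=False):
--     pos = 0
--     neg = 0
--     for t in terms:
--         if t in afinn:
--             if afinn[t] > 0:
--                 pos += afinn[t]
--             else:
--                 neg += -1 * afinn[t]
--     return pos, neg
-- ===== SOURCE B (Python) =====
-- def afinn_sentiment2(terms, afinn, verbose=False):
--     # Invert the traversal: count term multiplicities once, then iterate the
--     # lexicon and weight each score by how often its word occurs.
--     counts = {}
--     for t in terms: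
--         counts[t] = counts.get(t, 0) + 1
--     pos = 0
--     neg = 0
--     for word, score in afinn.items():
--         c = counts.get(word, 0)
--         if score > 0:
--             pos += c * score
--         else:
--             neg += c * -score
--     return pos, neg
-- ===== Notes on version B (the rewrite author's own statement) =====
-- stated objective: alternative
-- what changed: Instead of scanning the terms and looking each one up in the lexicon, B builds a multiplicity counter over the terms once and then iterates the lexicon entries, adding count*score to the positive or negative total.
import Mathlib
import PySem

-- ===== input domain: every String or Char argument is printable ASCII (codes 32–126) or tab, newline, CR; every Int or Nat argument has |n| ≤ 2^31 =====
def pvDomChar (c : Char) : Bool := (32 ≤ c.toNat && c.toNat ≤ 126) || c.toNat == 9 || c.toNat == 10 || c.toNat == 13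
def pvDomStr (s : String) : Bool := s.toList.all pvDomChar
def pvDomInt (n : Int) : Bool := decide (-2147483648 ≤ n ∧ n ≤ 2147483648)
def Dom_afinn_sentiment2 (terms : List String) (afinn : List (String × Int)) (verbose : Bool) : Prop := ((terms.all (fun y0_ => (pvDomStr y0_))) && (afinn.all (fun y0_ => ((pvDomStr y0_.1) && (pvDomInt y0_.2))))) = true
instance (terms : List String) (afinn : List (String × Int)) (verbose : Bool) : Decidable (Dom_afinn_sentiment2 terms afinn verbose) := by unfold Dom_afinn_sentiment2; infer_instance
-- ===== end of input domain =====

-- B inverts the traversal: it counts term multiplicities once, then iterates the lexicon entries weighting each score by its word's count (alternative algorithm, same cost).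


-- ===== PORT A =====
-- dict lookup: first match in the association list (insertion order)
def pvLookup (afinn : List (String × Int)) (t : String) : Option Int :=
  (afinn.find? (fun p => p.1 == t)).map (·.2)

def afinn_sentiment2 (terms : List String) (afinn : List (String × Int)) (verbose : Bool) : Int × Int :=
  terms.foldl
    (fun s t =>
      match pvLookup afinn t with
      | some v => if v > 0 then (s.1 + v, s.2) else (s.1, s.2 + (-1) * v)
      | none => s)
    (0, 0)

-- ===== PORT B =====
-- B's first loop: counts[t] = counts.get(t, 0) + 1  is exactly Dict.modify t 0 (· + 1)
def pvCounter (terms : List String) : PySem.Dict String Int :=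
  terms.foldl (fun d t => d.modify t 0 (· + 1)) PySem.Dict.empty

-- B's second loop over the lexicon entries (c = counts.get(word, 0) inlined)
def afinn_sentiment2_alt (terms : List String) (afinn : List (String × Int)) (verbose : Bool) : Int × Int :=
  afinn.foldl
    (fun s q =>
      if q.2 > 0 then (s.1 + (pvCounter terms).getD q.1 0 * q.2, s.2)
      else (s.1, s.2 + (pvCounter terms).getD q.1 0 * (-q.2)))
    (0, 0)

-- ===== PRECONDITION & SPEC =====
-- Pre_ excludes association lists with duplicate keys: a Python dict can never
-- contain a duplicate key, so this excludes no input the Python A accepts; it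
-- only rules out degenerate assoc-list representations of the dict argument.
def Pre_afinn_sentiment2 (terms : List String) (afinn : List (String × Int)) (verbose : Bool) : Prop :=
  (afinn.map Prod.fst).Nodup
instance (terms : List String) (afinn : List (String × Int)) (verbose : Bool) : Decidable (Pre_afinn_sentiment2 terms afinn verbose) := by unfold Pre_afinn_sentiment2; infer_instance
def pvWitness_afinn_sentiment2 : List String × (List (String × Int)) × Bool :=
  (["good", "bad", "good", "meh"], [("good", 3), ("bad", -2), ("zero", 0)], false)

def Spec_afinn_sentiment2 (terms : List String) (afinn : List (String × Int)) (verbose : Bool) (out : Int × Int) : Prop := out = afinn_sentiment2_alt terms afinn verbose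
instance (terms : List String) (afinn : List (String × Int)) (verbose : Bool) (out : Int × Int) : Decidable (Spec_afinn_sentiment2 terms afinn verbose out) := by unfold Spec_afinn_sentiment2; infer_instance

-- ===== CLAIM =====
def Claim_equal_afinn_sentiment2 : Prop := ∀ (terms : List String) (afinn : List (String × Int)) (verbose : Bool), Dom_afinn_sentiment2 terms afinn verbose → Pre_afinn_sentiment2 terms afinn verbose → Spec_afinn_sentiment2 terms afinn verbose (afinn_sentiment2 terms afinn verbose)

-- ===== LEMMAS AND PROOFS =====

def pvGpos (v : Int) : Int := if v > 0 then v else 0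
def pvGneg (v : Int) : Int := if v > 0 then 0 else -v

-- A's loop accumulates per-term contributions
lemma pvA_loop (afinn : List (String × Int)) (ts : List String) (p n : Int) :
    ts.foldl
      (fun s t =>
        match pvLookup afinn t with
        | some v => if v > 0 then (s.1 + v, s.2) else (s.1, s.2 + (-1) * v)
        | none => s)
      (p, n)
    = (p + (ts.map (fun t => (pvLookup afinn t).elim 0 pvGpos)).sum,
       n + (ts.map (fun t => (pvLookup afinn t).elim 0 pvGneg)).sum) := by
  induction ts generalizing p n with
  | nil => simp
  | cons t ts ih =>
    simp only [List.foldl_cons, List.map_cons, List.sum_cons]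
    cases h : pvLookup afinn t with
    | none => rw [ih]; simp [pvGpos, pvGneg]
    | some v =>
      simp only [h, Option.elim_some]
      by_cases hv : v > 0
      · rw [if_pos hv, ih]
        simp only [pvGpos, pvGneg, if_pos hv, Prod.mk.injEq]
        constructor <;> ring
      · rw [if_neg hv, ih]
        simp only [pvGpos, pvGneg, if_neg hv, Prod.mk.injEq]
        constructor <;> ring

-- B's loop accumulates per-entry contributions weighted by the count
lemma pvB_loop (counts : PySem.Dict String Int) (l : List (String × Int)) (p n : Int) :
    l.foldl
      (fun s q =>
        if q.2 > 0 then (s.1 + counts.getD q.1 0 * q.2, s.2)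
        else (s.1, s.2 + counts.getD q.1 0 * (-q.2)))
      (p, n)
    = (p + (l.map (fun q => counts.getD q.1 0 * pvGpos q.2)).sum,
       n + (l.map (fun q => counts.getD q.1 0 * pvGneg q.2)).sum) := by
  induction l generalizing p n with
  | nil => simp
  | cons q l ih =>
    simp only [List.foldl_cons, List.map_cons, List.sum_cons]
    by_cases hv : q.2 > 0
    · rw [if_pos hv, ih]
      simp only [pvGpos, pvGneg, if_pos hv, Prod.mk.injEq]
      constructor <;> ring
    · rw [if_neg hv, ih]
      simp only [pvGpos, pvGneg, if_neg hv, Prod.mk.injEq]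
      constructor <;> ring

-- sum of an indicator over entries whose key is not present is 0
lemma pvSum_not_mem (l : List (String × Int)) (t : String) (g : Int → Int)
    (h : t ∉ l.map Prod.fst) :
    (l.map (fun q => (if q.1 = t then (1:Int) else 0) * g q.2)).sum = 0 := by
  induction l with
  | nil => simp
  | cons q l ih =>
    simp only [List.map_cons, List.mem_cons, not_or] at h ⊢
    rw [List.sum_cons, if_neg (fun e => h.1 e.symm), ih h.2]
    ring

-- with nodup keys, the indicator sum picks out exactly the looked-up entry
lemma pvPick (l : List (String × Int)) (t : String) (g : Int → Int)
    (hnd : (l.map Prod.fst).Nodup) :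
    (l.map (fun q => (if q.1 = t then (1:Int) else 0) * g q.2)).sum
      = (pvLookup l t).elim 0 g := by
  induction l with
  | nil => simp [pvLookup]
  | cons q l ih =>
    simp only [List.map_cons, List.nodup_cons] at hnd
    rw [List.map_cons, List.sum_cons]
    by_cases hq : q.1 = t
    · rw [if_pos hq, pvSum_not_mem l t g (hq ▸ hnd.1)]
      simp [pvLookup, hq]
    · rw [if_neg hq, ih hnd.2]
      have hb : (q.1 == t) = false := by simpa using hq
      simp [pvLookup, hb]

-- core: entry-wise count-weighted sum = term-wise sum (keys nodup)
lemma pvSwap (ts : List String) (l : List (String × Int)) (g : Int → Int)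
    (hnd : (l.map Prod.fst).Nodup) :
    (l.map (fun q => ((ts.count q.1 : Int)) * g q.2)).sum
      = (ts.map (fun t => (pvLookup l t).elim 0 g)).sum := by
  induction ts with
  | nil => simp
  | cons t ts ih =>
    rw [List.map_cons, List.sum_cons, ← ih, ← pvPick l t g hnd, ← List.sum_map_add]
    congr 1
    apply List.map_congr_left
    intro q _
    have hc : ((t :: ts).count q.1 : Int)
        = (ts.count q.1 : Int) + (if q.1 = t then 1 else 0) := by
      rw [List.count_cons]
      by_cases h : q.1 = t
      · simp [h]
      · have hb : ¬ t = q.1 := fun e => h e.symm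
        simp [h, hb]
    rw [hc]; ring

-- the counter loop computes multiplicities
lemma pvCounts (ts : List String) (w : String) :
    (pvCounter ts).getD w 0 = (ts.count w : Int) := by
  rw [pvCounter, ← PySem.Dict.counter_eq_foldl]
  exact PySem.Dict.getD_counter ts w

-- ===== VERDICT =====
theorem afinn_sentiment2_spec : Claim_equal_afinn_sentiment2 := by
  intro terms afinn verbose _ hpre
  unfold Spec_afinn_sentiment2 afinn_sentiment2 afinn_sentiment2_alt
  rw [pvA_loop, pvB_loop]
  simp only [pvCounts]
  rw [pvSwap terms afinn pvGpos hpre, pvSwap terms afinn pvGneg hpre]
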